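-- pv_equiv track=rewrite | github.com/CraftSpider/CraftBin | Python/utils/library_codes.py | is_topic_or_cutter
-- ===== SOURCE A (Python) =====
-- def is_topic_or_cutter(string):
--     """Checks whether a string fits the form [alpha]+[numeric]+"""
--     is_cutter = True
--     at_num = False
--     found_alpha = False
--     for char in string:
--         if at_num is False:
--             if char.isalpha():
--                 found_alpha = True
--             elif char.isnumeric():
--                 if found_alpha:
--                     at_num = True
--                 else:
--                     is_cutter = False
--                     break
--             else:
--                 is_cutter = False
--                 break
--         else:
--             if char.isalpha():
--                 is_cutter = False
--                 break
--             elif char.isnumeric():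
--                 pass
--             else:
--                 is_cutter = False
--                 break
--     return is_cutter
-- ===== SOURCE B (Python) =====
-- def is_topic_or_cutter(string):
--     """Checks whether a string fits the form [alpha]+[numeric]+"""
--     i = 0
--     while i < len(string) and string[i].isalpha():
--         i += 1
--     rest = string[i:]
--     if not rest:
--         return True
--     return i > 0 and all(c.isnumeric() for c in rest)
-- ===== Notes on version B (the rewrite author's own statement) =====
-- stated objective: simpler
-- what changed: Replaces A's single stateful pass with three flag variables and break by a two-phase decomposition: find the leading alphabetic run, then accept iff the rest is empty or (the run is non-empty and the rest is all numeric).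
import Mathlib
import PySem

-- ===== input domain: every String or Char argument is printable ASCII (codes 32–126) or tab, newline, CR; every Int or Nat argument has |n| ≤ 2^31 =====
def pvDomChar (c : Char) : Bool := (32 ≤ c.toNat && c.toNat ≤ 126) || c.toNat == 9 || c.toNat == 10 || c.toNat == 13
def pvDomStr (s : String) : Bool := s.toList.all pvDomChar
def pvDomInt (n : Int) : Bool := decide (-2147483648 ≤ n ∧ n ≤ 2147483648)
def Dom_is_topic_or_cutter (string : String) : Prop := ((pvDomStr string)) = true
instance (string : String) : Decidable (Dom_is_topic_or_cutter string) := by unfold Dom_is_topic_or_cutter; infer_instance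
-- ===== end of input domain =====

-- B replaces A's one stateful flag-driven loop by a two-phase split (leading alpha run, then numeric rest); objective: simpler.
-- On the printable-ASCII domain Python's isnumeric() coincides with isdigit(); both ports use PySem.Chars.isdigit for it.

-- ===== PORT A =====
-- the for-loop with its three flags; `break`/`is_cutter = False` is returning false
def pvAlphaThenNumLoop : List Char → Bool → Bool → Bool
  | [], _at_num, _found_alpha => true
  | c :: cs, at_num, found_alpha =>
    if at_num = false then
      if PySem.Chars.isalpha c then pvAlphaThenNumLoop cs at_num true
      else if PySem.Chars.isdigit c then
        (if found_alpha then pvAlphaThenNumLoop cs true found_alpha else false)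
      else false
    else
      if PySem.Chars.isalpha c then false
      else if PySem.Chars.isdigit c then pvAlphaThenNumLoop cs at_num found_alpha
      else false

def is_topic_or_cutter (string : String) : Bool :=
  pvAlphaThenNumLoop string.toList false false

-- ===== PORT B =====
def is_topic_or_cutter_alt (string : String) : Bool :=
  let cs := string.toList
  let i := (cs.takeWhile PySem.Chars.isalpha).length   -- the while-loop advancing i over the alpha prefix
  let rest := cs.drop i
  if rest = [] then true
  else decide (0 < i) && rest.all PySem.Chars.isdigit

-- ===== PRECONDITION & SPEC =====
def Spec_is_topic_or_cutter (string : String) (out : Bool) : Prop := out = is_topic_or_cutter_alt string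
instance (string : String) (out : Bool) : Decidable (Spec_is_topic_or_cutter string out) := by unfold Spec_is_topic_or_cutter; infer_instance

-- ===== CLAIM (what is proved, stated in full; the proofs are below) =====
def Claim_equal_is_topic_or_cutter : Prop := ∀ (string : String), Dom_is_topic_or_cutter string → Spec_is_topic_or_cutter string (is_topic_or_cutter string)

-- ===== LEMMAS AND PROOFS =====

theorem pv_alpha_not_digit (c : Char) (h : PySem.Chars.isalpha c = true) :
    PySem.Chars.isdigit c = false := by
  have h0 : ('0':Char).val.toNat = 48 := rfl
  have h9 : ('9':Char).val.toNat = 57 := rfl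
  have hA : ('A':Char).val.toNat = 65 := rfl
  have hZ : ('Z':Char).val.toNat = 90 := rfl
  have ha : ('a':Char).val.toNat = 97 := rfl
  have hz : ('z':Char).val.toNat = 122 := rfl
  simp only [PySem.Chars.isalpha, PySem.Chars.isupper, PySem.Chars.islower,
        PySem.Chars.isdigit, Bool.or_eq_true, Bool.and_eq_true, decide_eq_true_eq,
        Char.le_def, UInt32.le_iff_toNat_le, Bool.and_eq_false_iff, decide_eq_false_iff_not, not_le,
        h0, h9, hA, hZ, ha, hz] at *
  omega

-- once at_num is true, the loop just checks that all remaining chars are digits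
theorem pv_loop_num (cs : List Char) (f : Bool) :
    pvAlphaThenNumLoop cs true f = cs.all PySem.Chars.isdigit := by
  induction cs with
  | nil => rfl
  | cons c cs ih =>
    by_cases ha : PySem.Chars.isalpha c = true
    · simp [pvAlphaThenNumLoop, ha, pv_alpha_not_digit c ha]
    · by_cases hd : PySem.Chars.isdigit c = true
      · simp [pvAlphaThenNumLoop, ha, hd, ih]
      · simp [pvAlphaThenNumLoop, ha, hd]

theorem pv_loop_main (cs : List Char) (f : Bool) :
    pvAlphaThenNumLoop cs false f =
      (let i := (cs.takeWhile PySem.Chars.isalpha).length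
       let rest := cs.drop i
       if rest = [] then true else (f || decide (0 < i)) && rest.all PySem.Chars.isdigit) := by
  induction cs generalizing f with
  | nil => simp [pvAlphaThenNumLoop]
  | cons c cs ih =>
    by_cases ha : PySem.Chars.isalpha c = true
    · simp only [pvAlphaThenNumLoop, if_pos ha, List.takeWhile_cons_of_pos ha]
      rw [ih true]
      simp
    · by_cases hd : PySem.Chars.isdigit c = true
      · cases f with
        | true =>
          simp [pvAlphaThenNumLoop, hd, pv_loop_num, List.takeWhile_cons, ha]
        | false =>
          simp [pvAlphaThenNumLoop, hd, List.takeWhile_cons, ha]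
      · simp [pvAlphaThenNumLoop, hd, List.takeWhile_cons, ha]

-- ===== VERDICT (by name: the statement is the Claim_ definition above) =====
theorem is_topic_or_cutter_spec : Claim_equal_is_topic_or_cutter := by
  intro s _
  unfold Spec_is_topic_or_cutter is_topic_or_cutter is_topic_or_cutter_alt
  rw [pv_loop_main]
  simp
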